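-- pv_equiv track=rewrite | github.com/danieltm-hub/DAA-One-For-All | tree/isomorphic-tree.py | ahu_dfs
-- ===== SOURCE A (Python) =====
-- def ahu_dfs(tree, node, parent):
--     """
--     Depth-first search to encode the subtree rooted at 'node' into its canonical form using the AHU algorithm.
--
--     Parameters:
--     tree: The tree.
--     node: The current node.
--     parent: The parent of the current node.
--
--     Returns:
--     str: The canonical form encoding of the subtree.
--     """
--     labels = []
--     for child in tree[node]:
--         if child == parent:
--             continue
--         labels.append(ahu_dfs(tree, child, node))
--
--     if labels:
--         if len(set(labels)) < len(labels) / 2: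
--             count = {}
--             for lab in labels:
--                 count[lab] = count.get(lab, 0) + 1
--             sorted_labels = []
--             for lab in sorted(count):
--                 sorted_labels.extend([lab] * count[lab])
--         else:
--             sorted_labels = sorted(labels)
--     else:
--         sorted_labels = labels
--
--     return "(" + "".join(sorted_labels) + ")"
-- ===== SOURCE B (Python) =====
-- def ahu_dfs(tree, node, parent):
--     """AHU canonical encoding, computed iteratively: an explicit stack drives a
--     post-order traversal; a frame is finalized (children encodings gathered from
--     the enc table, sorted, wrapped in parentheses) only after all its non-parent
--     children have been processed."""
--     stack = [(node, parent, False)]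
--     enc = {}
--     while stack:
--         k, p, done = stack.pop()
--         if done:
--             enc[(k, p)] = "(" + "".join(sorted(enc[(c, k)] for c in tree[k] if c != p)) + ")"
--         else:
--             stack.append((k, p, True))
--             for c in tree[k]:
--                 if c != p:
--                     stack.append((c, k, False))
--     return enc[(node, parent)]
-- ===== Notes on version B (the rewrite author's own statement) =====
-- stated objective: alternative
-- what changed: A's recursive DFS (with a dict-based counting-sort special case for duplicate-heavy label lists) is replaced by an iterative explicit-stack post-order traversal: frames (node, parent, done) are popped from a stack, child encodings accumulate in an enc table, and a node is finalized (its children's encodings gathered from the table, sorted, wrapped in parentheses) only on its second, 'done' pop.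
import Mathlib
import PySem

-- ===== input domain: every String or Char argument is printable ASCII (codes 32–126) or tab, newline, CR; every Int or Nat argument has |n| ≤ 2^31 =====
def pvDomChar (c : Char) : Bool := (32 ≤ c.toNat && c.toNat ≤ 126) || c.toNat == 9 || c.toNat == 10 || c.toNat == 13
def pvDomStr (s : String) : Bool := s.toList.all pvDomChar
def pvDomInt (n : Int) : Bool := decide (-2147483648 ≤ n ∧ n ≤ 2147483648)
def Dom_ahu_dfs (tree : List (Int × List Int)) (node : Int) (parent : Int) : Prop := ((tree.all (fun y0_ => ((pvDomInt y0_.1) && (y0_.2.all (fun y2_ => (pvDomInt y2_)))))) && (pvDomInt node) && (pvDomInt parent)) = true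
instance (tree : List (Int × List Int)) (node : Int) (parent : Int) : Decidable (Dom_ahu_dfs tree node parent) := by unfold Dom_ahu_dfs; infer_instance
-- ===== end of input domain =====

-- B replaces A's recursive DFS (which has a dict-based counting-sort special case for
-- duplicate-heavy label lists) by an iterative explicit-stack post-order traversal over
-- (node, parent, done) frames with an enc table; objective: alternative (same cost).

-- Bound on the recursion depth of A on the inputs Pre_ admits (shared by the fixpoint
-- iteration count of Pre_): a terminating traversal never repeats a (node, parent)
-- state on one branch, which caps the depth by |tree| plus the number of self-looping entries.
def selfLoops (tree : List (Int × List Int)) : Nat :=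
  (tree.filter (fun kc => decide (kc.1 ∈ kc.2))).length

-- ===== PORT A =====
-- A's conditional label-sorting block (counting sort via a dict when labels are duplicate-heavy,
-- plain sorted() otherwise), extracted as a named helper; the code is A's line for line.
-- 'len(set(labels)) < len(labels)/2' (exact float halving of an int) is ported as the
-- equivalent integer inequality 2*len(set(labels)) < len(labels).
-- 'count[lab]' is ported as getD with default 0: lab is always a key of count there (KeyError impossible).
def ahuSortedLabels (labels : List String) : List String :=
  if labels ≠ [] then
    if 2 * (PySem.Set.ofList labels).length < labels.length then
      let count := labels.foldl (fun d lab => d.insert lab (d.getD lab 0 + 1))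
        (PySem.Dict.empty : PySem.Dict String Int)
      (PySem.List.sorted count.keys (fun x => x)).foldl
        (fun acc lab => acc ++ List.replicate (count.getD lab 0).toNat lab) []
    else PySem.List.sorted labels (fun x => x)
  else labels

-- A's recursion, with a fuel bound on the recursion depth. 'none' marks exactly the inputs on
-- which the Python raises (KeyError for a missing key, RecursionError on a cyclic structure) or
-- diverges; all of those lie outside Pre_ahu_dfs, whose admitted inputs keep the depth below the fuel.
mutual
def ahuA : Nat → List (Int × List Int) → Int → Int → Option String
  | 0, _, _, _ => none
  | (fuel+1), tree, node, parent =>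
    match (PySem.Dict.mk tree).get? node with      -- tree[node]
    | none => none
    | some children =>
      match ahuChildren fuel tree node parent children [] with   -- the labels loop
      | none => none
      | some labels => some ("(" ++ PySem.Str.join "" (ahuSortedLabels labels) ++ ")")
termination_by fuel _ _ _ => (fuel, 0)

def ahuChildren : Nat → List (Int × List Int) → Int → Int → List Int → List String → Option (List String)
  | _, _, _, _, [], acc => some acc
  | fuel, tree, node, parent, c :: rest, acc =>
    if c = parent then ahuChildren fuel tree node parent rest acc
    else
      match ahuA fuel tree c node with
      | none => none
      | some s => ahuChildren fuel tree node parent rest (acc ++ [s])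
termination_by fuel _ _ _ cs _ => (fuel, cs.length + 1)
end

def ahu_dfs (tree : List (Int × List Int)) (node : Int) (parent : Int) : String :=
  (ahuA (tree.length + selfLoops tree + 3) tree node parent).getD ""

-- ===== PORT B =====
-- Fuel for B's while-loop: one unit per pop. A frame good at fixpoint level n is fully
-- processed (itself and all its descendants) in at most frameCost n pops.
def maxKids (tree : List (Int × List Int)) : Nat :=
  tree.foldl (fun m kc => max m kc.2.length) 0

def frameCost (tree : List (Int × List Int)) : Nat → Nat
  | 0 => 2
  | n+1 => maxKids tree * frameCost tree n + 2

-- the generator 'enc[(c, k)] for c in tree[k] if c != p' of Source B's done-branch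
-- (none = KeyError on a missing enc entry)
def altCollect (enc : PySem.Dict (Int × Int) String) (k p : Int) : List Int → List String → Option (List String)
  | [], acc => some acc
  | c :: rest, acc =>
    if c = p then altCollect enc k p rest acc
    else match enc.get? (c, k) with
      | none => none
      | some s => altCollect enc k p rest (acc ++ [s])

-- Source B's while-loop: stack head = top (Python's list end); one fuel unit per pop
def altLoop (tree : List (Int × List Int)) : Nat → List (Int × Int × Bool) → PySem.Dict (Int × Int) String → Option (PySem.Dict (Int × Int) String)
  | 0, _, _ => none
  | _+1, [], enc => some enc
  | f+1, (k, p, done) :: rest, enc =>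
    if done then
      match (PySem.Dict.mk tree).get? k with      -- tree[k]
      | none => none
      | some cs =>
        match altCollect enc k p cs [] with
        | none => none
        | some labels =>
          altLoop tree f rest (enc.insert (k, p) ("(" ++ PySem.Str.join "" (PySem.List.sorted labels (fun x => x)) ++ ")"))
    else
      match (PySem.Dict.mk tree).get? k with      -- tree[k]
      | none => none
      | some cs =>
        altLoop tree f (cs.foldl (fun st c => if c ≠ p then (c, k, false) :: st else st) ((k, p, true) :: rest)) enc

def ahu_dfs_alt (tree : List (Int × List Int)) (node : Int) (parent : Int) : String :=
  match altLoop tree (frameCost tree (tree.length + selfLoops tree + 3) + 2) [(node, parent, false)] PySem.Dict.empty with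
  | none => ""
  | some enc => (enc.get? (node, parent)).getD ""

-- ===== PRECONDITION & SPEC =====
-- Pre_ahu_dfs is A's exact domain: A returns normally iff the (node, parent) unfolding of the
-- adjacency with the parent-skip is well-founded and stays inside the dict's keys; otherwise A
-- raises (KeyError on a missing child key, RecursionError on a reachable cycle). Well-foundedness
-- is stated as a least fixpoint: a state (k, p) is good when k is a key and every child except p
-- is an already-good state; goodIter iterates this to the fixpoint over all key pairs.
def ahuCands (tree : List (Int × List Int)) : List (Int × Int) :=
  (tree.map Prod.fst).flatMap (fun k => (tree.map Prod.fst).map (fun p => (k, p)))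

def goodStep (tree : List (Int × List Int)) (W : List (Int × Int)) (kp : Int × Int) : Bool :=
  match (PySem.Dict.mk tree).get? kp.1 with
  | none => false
  | some cs => cs.all (fun c => c == kp.2 || W.contains (c, kp.1))

def goodIter (tree : List (Int × List Int)) : Nat → List (Int × Int)
  | 0 => []
  | n+1 => (ahuCands tree).filter (goodStep tree (goodIter tree n))

def Pre_ahu_dfs (tree : List (Int × List Int)) (node : Int) (parent : Int) : Prop :=
  goodStep tree (goodIter tree (tree.length + selfLoops tree + 2)) (node, parent) = true
instance (tree : List (Int × List Int)) (node : Int) (parent : Int) : Decidable (Pre_ahu_dfs tree node parent) := by unfold Pre_ahu_dfs; infer_instance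

def pvWitness_ahu_dfs : (List (Int × List Int)) × Int × Int := ([(0, [])], 0, -1)

def Spec_ahu_dfs (tree : List (Int × List Int)) (node : Int) (parent : Int) (out : String) : Prop := out = ahu_dfs_alt tree node parent
instance (tree : List (Int × List Int)) (node : Int) (parent : Int) (out : String) : Decidable (Spec_ahu_dfs tree node parent out) := by unfold Spec_ahu_dfs; infer_instance

-- ===== CLAIM (what is proved, stated in full; the proofs are below) =====
def Claim_equal_ahu_dfs : Prop := ∀ (tree : List (Int × List Int)) (node : Int) (parent : Int), Dom_ahu_dfs tree node parent → Pre_ahu_dfs tree node parent → Spec_ahu_dfs tree node parent (ahu_dfs tree node parent)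

-- ===== LEMMAS AND PROOFS =====

-- "s is the value of A's recursion at state (k, p), for some sufficient fuel"
def EvalA (tree : List (Int × List Int)) (k p : Int) (s : String) : Prop :=
  ∃ f, ahuA f tree k p = some s

-- every enc entry holds A's value of its state
def Coherent (tree : List (Int × List Int)) (enc : PySem.Dict (Int × Int) String) : Prop :=
  ∀ a b s, enc.get? (a, b) = some s → EvalA tree a b s

-- the enc table only grows (values at surviving keys unchanged)
def Extends (e1 e2 : PySem.Dict (Int × Int) String) : Prop :=
  ∀ key s, e1.get? key = some s → e2.get? key = some s

lemma ahuA_succ (fuel : Nat) (tree : List (Int × List Int)) (node parent : Int) :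
    ahuA (fuel+1) tree node parent
      = match (PySem.Dict.mk tree).get? node with
        | none => none
        | some children =>
          match ahuChildren fuel tree node parent children [] with
          | none => none
          | some labels => some ("(" ++ PySem.Str.join "" (ahuSortedLabels labels) ++ ")") := by
  rw [ahuA]

-- one-step evaluation forms of A's port (match arms resolved)
lemma ahuA_noget (fuel : Nat) (tree : List (Int × List Int)) (node parent : Int)
    (hget : (PySem.Dict.mk tree).get? node = none) : ahuA (fuel+1) tree node parent = none := by
  rw [ahuA_succ, hget]

lemma ahuA_eval_none (fuel : Nat) (tree : List (Int × List Int)) (node parent : Int)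
    (cs : List Int) (hget : (PySem.Dict.mk tree).get? node = some cs)
    (hch : ahuChildren fuel tree node parent cs [] = none) : ahuA (fuel+1) tree node parent = none := by
  rw [ahuA_succ, hget]
  show (match ahuChildren fuel tree node parent cs [] with
    | none => none
    | some labels => some ("(" ++ PySem.Str.join "" (ahuSortedLabels labels) ++ ")")) = none
  rw [hch]

lemma ahuA_eval (fuel : Nat) (tree : List (Int × List Int)) (node parent : Int)
    (cs : List Int) (labels : List String) (hget : (PySem.Dict.mk tree).get? node = some cs)
    (hch : ahuChildren fuel tree node parent cs [] = some labels) :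
    ahuA (fuel+1) tree node parent = some ("(" ++ PySem.Str.join "" (ahuSortedLabels labels) ++ ")") := by
  rw [ahuA_succ, hget]
  show (match ahuChildren fuel tree node parent cs [] with
    | none => none
    | some labels => some ("(" ++ PySem.Str.join "" (ahuSortedLabels labels) ++ ")"))
    = some ("(" ++ PySem.Str.join "" (ahuSortedLabels labels) ++ ")")
  rw [hch]

-- counting-sort branch: equal keys grouped, across distinct sorted keys the order is strict
lemma pairwise_flatMap_replicate (n : String → Nat) :
    ∀ ks : List String, ks.Pairwise (· < ·) →
      (ks.flatMap (fun k => List.replicate (n k) k)).Pairwise (· ≤ ·) := by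
  intro ks
  induction ks with
  | nil => intro _; simp
  | cons k rest ih =>
    intro hp
    rw [List.flatMap_cons, List.pairwise_append]
    refine ⟨List.pairwise_replicate.mpr (Or.inr le_rfl), ih (List.pairwise_cons.mp hp).2, ?_⟩
    intro x hx y hy
    have hxk := List.eq_of_mem_replicate hx
    obtain ⟨k', hk', hy'⟩ := List.mem_flatMap.mp hy
    have hyk := List.eq_of_mem_replicate hy'
    rw [hxk, hyk]
    exact le_of_lt ((List.pairwise_cons.mp hp).1 k' hk')

lemma count_flatMap_replicate (xs : List String) :
    ∀ ks : List String, ks.Nodup → ∀ v : String,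
      (ks.flatMap (fun k => List.replicate (xs.count k) k)).count v
        = if v ∈ ks then xs.count v else 0 := by
  intro ks
  induction ks with
  | nil => intro _ v; simp
  | cons k rest ih =>
    intro hnd v
    rw [List.flatMap_cons, List.count_append, List.count_replicate,
        ih hnd.of_cons v]
    by_cases hv : v = k
    · subst hv
      have : v ∉ rest := (List.nodup_cons.mp hnd).1
      simp [this]
    · simp [hv, Ne.symm hv]

-- A's two sorting paths produce the same list: sorted(labels)
lemma branch_eq (labels : List String) :
    ahuSortedLabels labels = PySem.List.sorted labels (fun x => x) := by
  unfold ahuSortedLabels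
  by_cases h0 : labels = []
  · subst h0
    have hs : PySem.List.sorted ([] : List String) (fun x => x) = [] :=
      (PySem.List.sorted_eq_nil_iff _ _ _).mpr rfl
    simp [hs]
  · rw [if_pos h0]
    by_cases hcnt : 2 * (PySem.Set.ofList labels).length < labels.length
    · rw [if_pos hcnt]
      have hk : (labels.foldl (fun d lab => d.insert lab (d.getD lab 0 + 1))
            (PySem.Dict.empty : PySem.Dict String Int)).keys
          = PySem.Set.ofList labels := by
        rw [PySem.Dict.keys_foldl_insert]
        simp [PySem.Dict.keys, PySem.Dict.empty, PySem.Set.update_nil_left]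
      have hg : ∀ v, (labels.foldl (fun d lab => d.insert lab (d.getD lab 0 + 1))
            (PySem.Dict.empty : PySem.Dict String Int)).getD v 0
          = (labels.count v : Int) := by
        intro v
        rw [PySem.Dict.getD_foldl_insert_add_one]
        simp [PySem.Dict.getD, PySem.Dict.get?, PySem.Dict.empty]
      have hlt := PySem.List.sorted_ofList_pairwise_lt (κ := String) labels
      have hnds : (PySem.List.sorted (PySem.Set.ofList labels) (fun x => x)).Nodup :=
        hlt.imp ne_of_lt
      have hperm : (PySem.List.sorted (PySem.Set.ofList labels) (fun x => x)).flatMap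
            (fun k => List.replicate (labels.count k) k) |>.Perm labels := by
        apply List.perm_iff_count.mpr
        intro v
        rw [count_flatMap_replicate labels _ hnds v]
        by_cases hv : v ∈ labels
        · simp [PySem.List.mem_sorted, PySem.Set.mem_ofList, hv]
        · simp [PySem.List.mem_sorted, PySem.Set.mem_ofList, hv,
            List.count_eq_zero.mpr hv]
      simp only [hk, hg, Int.toNat_natCast]
      rw [PySem.List.foldl_append_eq_flatMap, List.nil_append]
      exact (PySem.List.sorted_id_eq_of_perm_of_pairwise labels _ hperm
        (pairwise_flatMap_replicate _ _ hlt)).symm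
    · rw [if_neg hcnt]

-- A's children loop succeeds when every non-skipped child evaluates
lemma ahuChildren_some (f : Nat) (tree : List (Int × List Int)) (k p : Int) :
    ∀ (cs : List Int) (acc : List String),
      (∀ c ∈ cs, c ≠ p → ∃ s, ahuA f tree c k = some s) →
      ∃ r, ahuChildren f tree k p cs acc = some r := by
  intro cs
  induction cs with
  | nil => intro acc _; exact ⟨acc, by rw [ahuChildren]⟩
  | cons c rest ih =>
    intro acc h
    by_cases hc : c = p
    · rw [ahuChildren, if_pos hc]
      exact ih acc (fun d hd => h d (List.mem_cons_of_mem _ hd))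
    · obtain ⟨s, hs⟩ := h c List.mem_cons_self hc
      rw [ahuChildren, if_neg hc, hs]
      exact ih (acc ++ [s]) (fun d hd => h d (List.mem_cons_of_mem _ hd))

-- A succeeds on every good state, fuel-aligned with the fixpoint iteration
lemma goodStep_ahuA (tree : List (Int × List Int)) :
    ∀ (n : Nat) (k p : Int), goodStep tree (goodIter tree n) (k, p) = true →
      ∃ s, ahuA (n+1) tree k p = some s := by
  intro n
  induction n with
  | zero =>
    intro k p h
    unfold goodStep at h
    cases hget : (PySem.Dict.mk tree).get? k with
    | none => rw [hget] at h; exact absurd h (by simp)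
    | some cs =>
      rw [hget] at h
      simp only [List.all_eq_true] at h
      obtain ⟨r, hr⟩ := ahuChildren_some 0 tree k p cs []
        (fun c hc hcp => absurd (by simpa [goodIter] using h c hc) hcp)
      exact ⟨_, ahuA_eval 0 tree k p cs r hget hr⟩
  | succ m ih =>
    intro k p h
    unfold goodStep at h
    cases hget : (PySem.Dict.mk tree).get? k with
    | none => rw [hget] at h; exact absurd h (by simp)
    | some cs =>
      rw [hget] at h
      simp only [List.all_eq_true] at h
      have hkid : ∀ c ∈ cs, c ≠ p → ∃ s, ahuA (m+1) tree c k = some s := by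
        intro c hc hcp
        have h2 := h c hc
        rw [Bool.or_eq_true, beq_iff_eq] at h2
        rcases h2 with h2 | h2
        · exact absurd h2 hcp
        · have hmem := List.contains_iff_mem.mp h2
          rw [goodIter] at hmem
          exact ih c k (List.mem_filter.mp hmem).2
      obtain ⟨r, hr⟩ := ahuChildren_some (m+1) tree k p cs [] hkid
      exact ⟨_, ahuA_eval (m+1) tree k p cs r hget hr⟩

-- fuel monotonicity of A's recursion
lemma ahuChildren_mono (f : Nat)
    (hm : ∀ (tree : List (Int × List Int)) (k p : Int) (s : String),
      ahuA f tree k p = some s → ahuA (f+1) tree k p = some s)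
    (tree : List (Int × List Int)) (k p : Int) :
    ∀ (cs : List Int) (acc r : List String),
      ahuChildren f tree k p cs acc = some r → ahuChildren (f+1) tree k p cs acc = some r := by
  intro cs
  induction cs with
  | nil => intro acc r h; rw [ahuChildren] at h ⊢; exact h
  | cons c rest ih =>
    intro acc r h
    by_cases hc : c = p
    · rw [ahuChildren, if_pos hc] at h ⊢
      exact ih _ _ h
    · rw [ahuChildren, if_neg hc] at h ⊢
      cases hA : ahuA f tree c k with
      | none => rw [hA] at h; exact absurd h (by simp)
      | some s =>
        rw [hA] at h
        rw [hm tree c k s hA]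
        exact ih _ _ h

lemma ahuA_mono : ∀ (f : Nat) (tree : List (Int × List Int)) (k p : Int) (s : String),
    ahuA f tree k p = some s → ahuA (f+1) tree k p = some s := by
  intro f
  induction f with
  | zero => intro tree k p s h; simp [ahuA] at h
  | succ f ih =>
    intro tree k p s h
    cases hget : (PySem.Dict.mk tree).get? k with
    | none => rw [ahuA_noget f tree k p hget] at h; exact absurd h (by simp)
    | some cs =>
      cases hch : ahuChildren f tree k p cs [] with
      | none => rw [ahuA_eval_none f tree k p cs hget hch] at h; exact absurd h (by simp)
      | some labels =>
        rw [ahuA_eval f tree k p cs labels hget hch] at h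
        rw [ahuA_eval (f+1) tree k p cs labels hget
          (ahuChildren_mono f ih tree k p cs [] labels hch)]
        exact h

lemma ahuA_mono_le (tree : List (Int × List Int)) (k p : Int) (s : String)
    (f g : Nat) (hfg : f ≤ g) (h : ahuA f tree k p = some s) : ahuA g tree k p = some s := by
  induction g, hfg using Nat.le_induction with
  | base => exact h
  | succ n hn ihn => exact ahuA_mono n tree k p s ihn

lemma evalA_unique (tree : List (Int × List Int)) (k p : Int) (s1 s2 : String)
    (h1 : EvalA tree k p s1) (h2 : EvalA tree k p s2) : s1 = s2 := by
  obtain ⟨f, h1⟩ := h1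
  obtain ⟨g, h2⟩ := h2
  have e1 := ahuA_mono_le tree k p s1 f (max f g) (le_max_left _ _) h1
  have e2 := ahuA_mono_le tree k p s2 g (max f g) (le_max_right _ _) h2
  rw [e1] at e2
  exact Option.some.inj e2

-- what A's children loop returns: the labels of the non-skipped children, in order
lemma ahuChildren_chars (f : Nat) (tree : List (Int × List Int)) (k p : Int) :
    ∀ (cs : List Int) (acc r : List String), ahuChildren f tree k p cs acc = some r →
      ∃ ls, r = acc ++ ls ∧
        List.Forall₂ (fun c s => ahuA f tree c k = some s) (cs.filter (fun c => c ≠ p)) ls := by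
  intro cs
  induction cs with
  | nil =>
    intro acc r h
    rw [ahuChildren] at h
    exact ⟨[], by simp [(Option.some.inj h).symm], by simp⟩
  | cons c rest ih =>
    intro acc r h
    by_cases hc : c = p
    · rw [ahuChildren, if_pos hc] at h
      obtain ⟨ls, hr, hf⟩ := ih acc r h
      exact ⟨ls, hr, by simpa [hc] using hf⟩
    · rw [ahuChildren, if_neg hc] at h
      cases hA : ahuA f tree c k with
      | none => rw [hA] at h; exact absurd h (by simp)
      | some s =>
        rw [hA] at h
        obtain ⟨ls, hr, hf⟩ := ih (acc ++ [s]) r h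
        refine ⟨s :: ls, by simp [hr], ?_⟩
        have hfc : (c :: rest).filter (fun c => decide (c ≠ p))
            = c :: rest.filter (fun c => decide (c ≠ p)) := by
          simp [hc]
        rw [hfc]
        exact List.Forall₂.cons hA hf

-- two label lists for the same child list agree pointwise
lemma labels_unique (tree : List (Int × List Int)) (k : Int) :
    ∀ (xs : List Int) (l1 l2 : List String),
      List.Forall₂ (fun c s => EvalA tree c k s) xs l1 →
      List.Forall₂ (fun c s => EvalA tree c k s) xs l2 → l1 = l2 := by
  intro xs
  induction xs with
  | nil => intro l1 l2 h1 h2; cases h1; cases h2; rfl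
  | cons c rest ih =>
    intro l1 l2 h1 h2
    cases h1 with
    | cons hh1 ht1 =>
      cases h2 with
      | cons hh2 ht2 =>
        rw [evalA_unique tree c k _ _ hh1 hh2, ih _ _ ht1 ht2]

-- ---- evaluation forms of B's loop (match arms resolved) ----
lemma altLoop_nil (tree : List (Int × List Int)) (f : Nat) (enc : PySem.Dict (Int × Int) String) :
    altLoop tree (f+1) [] enc = some enc := by rw [altLoop]

lemma altLoop_push_eval (tree : List (Int × List Int)) (f : Nat) (k p : Int)
    (rest : List (Int × Int × Bool)) (enc : PySem.Dict (Int × Int) String) (cs : List Int)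
    (hget : (PySem.Dict.mk tree).get? k = some cs) :
    altLoop tree (f+1) ((k, p, false) :: rest) enc
      = altLoop tree f (cs.foldl (fun st c => if c ≠ p then (c, k, false) :: st else st) ((k, p, true) :: rest)) enc := by
  rw [altLoop]
  simp only [Bool.false_eq_true, if_false, hget]

lemma altLoop_push_noget (tree : List (Int × List Int)) (f : Nat) (k p : Int)
    (rest : List (Int × Int × Bool)) (enc : PySem.Dict (Int × Int) String)
    (hget : (PySem.Dict.mk tree).get? k = none) :
    altLoop tree (f+1) ((k, p, false) :: rest) enc = none := by
  rw [altLoop]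
  simp only [Bool.false_eq_true, if_false, hget]

lemma altLoop_done_eval (tree : List (Int × List Int)) (f : Nat) (k p : Int)
    (rest : List (Int × Int × Bool)) (enc : PySem.Dict (Int × Int) String) (cs : List Int)
    (labels : List String) (hget : (PySem.Dict.mk tree).get? k = some cs)
    (hcol : altCollect enc k p cs [] = some labels) :
    altLoop tree (f+1) ((k, p, true) :: rest) enc
      = altLoop tree f rest (enc.insert (k, p) ("(" ++ PySem.Str.join "" (PySem.List.sorted labels (fun x => x)) ++ ")")) := by
  rw [altLoop]
  simp only [if_true, hget]
  show (match altCollect enc k p cs [] with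
    | none => none
    | some labels =>
      altLoop tree f rest (enc.insert (k, p) ("(" ++ PySem.Str.join "" (PySem.List.sorted labels (fun x => x)) ++ ")"))) = _
  rw [hcol]

lemma altLoop_done_noget (tree : List (Int × List Int)) (f : Nat) (k p : Int)
    (rest : List (Int × Int × Bool)) (enc : PySem.Dict (Int × Int) String)
    (hget : (PySem.Dict.mk tree).get? k = none) :
    altLoop tree (f+1) ((k, p, true) :: rest) enc = none := by
  rw [altLoop]
  simp only [if_true, hget]

lemma altLoop_done_nocol (tree : List (Int × List Int)) (f : Nat) (k p : Int)
    (rest : List (Int × Int × Bool)) (enc : PySem.Dict (Int × Int) String) (cs : List Int)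
    (hget : (PySem.Dict.mk tree).get? k = some cs)
    (hcol : altCollect enc k p cs [] = none) :
    altLoop tree (f+1) ((k, p, true) :: rest) enc = none := by
  rw [altLoop]
  simp only [if_true, hget]
  show (match altCollect enc k p cs [] with
    | none => none
    | some labels =>
      altLoop tree f rest (enc.insert (k, p) ("(" ++ PySem.Str.join "" (PySem.List.sorted labels (fun x => x)) ++ ")"))) = _
  rw [hcol]

-- fuel monotonicity of B's loop
lemma altLoop_mono (tree : List (Int × List Int)) :
    ∀ (f : Nat) (st : List (Int × Int × Bool)) (enc r : PySem.Dict (Int × Int) String),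
      altLoop tree f st enc = some r → altLoop tree (f+1) st enc = some r := by
  intro f
  induction f with
  | zero => intro st enc r h; simp [altLoop] at h
  | succ f ih =>
    intro st enc r h
    match st with
    | [] => rw [altLoop_nil] at h ⊢; exact h
    | (k, p, true) :: rest =>
      cases hget : (PySem.Dict.mk tree).get? k with
      | none => rw [altLoop_done_noget tree f k p rest enc hget] at h; exact absurd h (by simp)
      | some cs =>
        cases hcol : altCollect enc k p cs [] with
        | none => rw [altLoop_done_nocol tree f k p rest enc cs hget hcol] at h; exact absurd h (by simp)
        | some labels =>
          rw [altLoop_done_eval tree f k p rest enc cs labels hget hcol] at h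
          rw [altLoop_done_eval tree (f+1) k p rest enc cs labels hget hcol]
          exact ih _ _ _ h
    | (k, p, false) :: rest =>
      cases hget : (PySem.Dict.mk tree).get? k with
      | none => rw [altLoop_push_noget tree f k p rest enc hget] at h; exact absurd h (by simp)
      | some cs =>
        rw [altLoop_push_eval tree f k p rest enc cs hget] at h
        rw [altLoop_push_eval tree (f+1) k p rest enc cs hget]
        exact ih _ _ _ h

lemma altLoop_mono_le (tree : List (Int × List Int)) (f g : Nat) (hfg : f ≤ g)
    (st : List (Int × Int × Bool)) (enc r : PySem.Dict (Int × Int) String)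
    (h : altLoop tree f st enc = some r) : altLoop tree g st enc = some r := by
  induction g, hfg using Nat.le_induction with
  | base => exact h
  | succ n hn ihn => exact altLoop_mono tree n st enc r ihn

-- the collect generator succeeds when every non-skipped child has an enc entry
lemma altCollect_some (enc : PySem.Dict (Int × Int) String) (k p : Int) :
    ∀ (cs : List Int) (acc : List String),
      (∀ c ∈ cs, c ≠ p → ∃ s, enc.get? (c, k) = some s) →
      ∃ ls, altCollect enc k p cs acc = some (acc ++ ls) ∧
        List.Forall₂ (fun c s => enc.get? (c, k) = some s) (cs.filter (fun c => c ≠ p)) ls := by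
  intro cs
  induction cs with
  | nil => intro acc _; exact ⟨[], by simp [altCollect], by simp⟩
  | cons c rest ih =>
    intro acc h
    by_cases hc : c = p
    · obtain ⟨ls, h1, h2⟩ := ih acc (fun d hd => h d (List.mem_cons_of_mem _ hd))
      refine ⟨ls, ?_, by simpa [hc] using h2⟩
      rw [altCollect, if_pos hc]; exact h1
    · obtain ⟨s, hs⟩ := h c List.mem_cons_self hc
      obtain ⟨ls, h1, h2⟩ := ih (acc ++ [s]) (fun d hd => h d (List.mem_cons_of_mem _ hd))
      refine ⟨s :: ls, ?_, ?_⟩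
      · rw [altCollect, if_neg hc, hs]
        simpa [List.append_assoc] using h1
      · have hfc : (c :: rest).filter (fun c => decide (c ≠ p))
            = c :: rest.filter (fun c => decide (c ≠ p)) := by simp [hc]
        rw [hfc]
        exact List.Forall₂.cons hs h2

-- ---- child-list length is bounded by maxKids ----
lemma foldl_max_base_le : ∀ (l : List (Int × List Int)) (b : Nat),
    b ≤ l.foldl (fun m kc => max m kc.2.length) b := by
  intro l
  induction l with
  | nil => intro b; exact le_rfl
  | cons e rest ih =>
    intro b
    exact le_trans (le_max_left b e.2.length) (ih (max b e.2.length))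

lemma foldl_max_mem_le : ∀ (l : List (Int × List Int)) (b : Nat) (kc : Int × List Int),
    kc ∈ l → kc.2.length ≤ l.foldl (fun m kc => max m kc.2.length) b := by
  intro l
  induction l with
  | nil => intro b kc h; exact absurd h (List.not_mem_nil)
  | cons e rest ih =>
    intro b kc h
    rcases List.mem_cons.mp h with h | h
    · subst h
      exact le_trans (le_max_right b kc.2.length) (foldl_max_base_le rest _)
    · exact ih _ kc h

lemma get?_mk_mem : ∀ (tree : List (Int × List Int)) (k : Int) (cs : List Int),
    (PySem.Dict.mk tree).get? k = some cs → (k, cs) ∈ tree := by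
  intro tree
  induction tree with
  | nil => intro k cs h; simp [PySem.Dict.get?] at h
  | cons e rest ih =>
    intro k cs h
    obtain ⟨k', v⟩ := e
    rw [PySem.Dict.get?_mk_cons] at h
    by_cases hk : k' == k
    · rw [if_pos hk] at h
      rw [show k' = k from by simpa using hk, Option.some.inj h]
      exact List.mem_cons_self
    · rw [if_neg hk] at h
      exact List.mem_cons_of_mem _ (ih k cs h)

lemma kids_le_maxKids (tree : List (Int × List Int)) (k : Int) (cs : List Int)
    (hget : (PySem.Dict.mk tree).get? k = some cs) : cs.length ≤ maxKids tree :=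
  foldl_max_mem_le tree 0 (k, cs) (get?_mk_mem tree k cs hget)

-- processing a run of child frames: each non-skipped child is handled by H at cost C,
-- the enc table grows coherently and ends up holding an entry for every such child
lemma machine_children (tree : List (Int × List Int)) (k p : Int) (C : Nat)
    (good : Int → Prop)
    (H : ∀ (c : Int) (enc : PySem.Dict (Int × Int) String), Coherent tree enc → good c →
      ∃ enc', Coherent tree enc' ∧ Extends enc enc' ∧
        (∃ s, EvalA tree c k s ∧ enc'.get? (c, k) = some s) ∧
        ∀ (rest : List (Int × Int × Bool)) (g : Nat) (r : PySem.Dict (Int × Int) String),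
          altLoop tree g rest enc' = some r →
          altLoop tree (C + g) ((c, k, false) :: rest) enc = some r) :
    ∀ (cs : List Int) (enc : PySem.Dict (Int × Int) String), Coherent tree enc →
      (∀ c ∈ cs, c ≠ p → good c) →
      ∃ enc', Coherent tree enc' ∧ Extends enc enc' ∧
        (∀ c ∈ cs, c ≠ p → ∃ s, EvalA tree c k s ∧ enc'.get? (c, k) = some s) ∧
        ∀ (B : List (Int × Int × Bool)) (g : Nat) (r : PySem.Dict (Int × Int) String),
          altLoop tree g B enc' = some r →
          altLoop tree (cs.length * C + g)
            (cs.foldl (fun st c => if c ≠ p then (c, k, false) :: st else st) B) enc = some r := by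
  intro cs
  induction cs with
  | nil =>
    intro enc hco _
    refine ⟨enc, hco, fun _ _ h => h, by simp, ?_⟩
    intro B g r h
    simpa using h
  | cons c rest ih =>
    intro enc hco hg
    by_cases hc : c = p
    · obtain ⟨enc', h1, h2, h3, T⟩ := ih enc hco (fun d hd => hg d (List.mem_cons_of_mem _ hd))
      refine ⟨enc', h1, h2, ?_, ?_⟩
      · intro d hd hdp
        rcases List.mem_cons.mp hd with hd | hd
        · exact absurd (hd.trans hc) hdp
        · exact h3 d hd hdp
      · intro B g r h
        have hfold : (c :: rest).foldl (fun st c => if c ≠ p then (c, k, false) :: st else st) B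
            = rest.foldl (fun st c => if c ≠ p then (c, k, false) :: st else st) B := by
          rw [List.foldl_cons, if_neg (by simpa using hc)]
        rw [hfold, List.length_cons, Nat.succ_mul]
        have hle : rest.length * C + g ≤ rest.length * C + C + g := by
          have : ∀ a : Nat, a + g ≤ a + C + g := fun a => by omega
          exact this _
        exact altLoop_mono_le tree _ _ hle _ _ _ (T B g r h)
    · obtain ⟨e1, hco1, hext1, hhas1, T1⟩ := ih enc hco (fun d hd => hg d (List.mem_cons_of_mem _ hd))
      obtain ⟨e2, hco2, hext2, ⟨s, hev, hgets⟩, T2⟩ := H c e1 hco1 (hg c List.mem_cons_self hc)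
      refine ⟨e2, hco2, fun key v h => hext2 key v (hext1 key v h), ?_, ?_⟩
      · intro d hd hdp
        rcases List.mem_cons.mp hd with hd | hd
        · subst hd; exact ⟨s, hev, hgets⟩
        · obtain ⟨s', hev', hget'⟩ := hhas1 d hd hdp
          exact ⟨s', hev', hext2 _ _ hget'⟩
      · intro B g r h
        have step1 := T2 B g r h
        have step2 := T1 ((c, k, false) :: B) (C + g) r step1
        have hfold : (c :: rest).foldl (fun st c => if c ≠ p then (c, k, false) :: st else st) B
            = rest.foldl (fun st c => if c ≠ p then (c, k, false) :: st else st) ((c, k, false) :: B) := by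
          rw [List.foldl_cons, if_pos (by simpa using hc)]
        rw [hfold, List.length_cons, Nat.succ_mul, Nat.add_assoc]
        exact step2

-- one good frame, given the recursion hypothesis for the states the previous iterate certifies:
-- pop the not-done frame, run the child frames, pop the done frame and insert A's value
lemma machine_core (tree : List (Int × List Int)) (n : Nat) (k p : Int) (F : Nat)
    (hF : ∀ cs : List Int, (PySem.Dict.mk tree).get? k = some cs → cs.length * frameCost tree n + 2 ≤ F)
    (enc : PySem.Dict (Int × Int) String) (hco : Coherent tree enc)
    (h : goodStep tree (goodIter tree n) (k, p) = true)
    (H : ∀ (c : Int) (enc' : PySem.Dict (Int × Int) String), Coherent tree enc' →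
      (goodIter tree n).contains (c, k) = true →
      ∃ enc'', Coherent tree enc'' ∧ Extends enc' enc'' ∧
        (∃ s, EvalA tree c k s ∧ enc''.get? (c, k) = some s) ∧
        ∀ (rest : List (Int × Int × Bool)) (g : Nat) (r : PySem.Dict (Int × Int) String),
          altLoop tree g rest enc'' = some r →
          altLoop tree (frameCost tree n + g) ((c, k, false) :: rest) enc' = some r) :
    ∃ enc', Coherent tree enc' ∧ Extends enc enc' ∧
      (∃ s, EvalA tree k p s ∧ enc'.get? (k, p) = some s) ∧
      ∀ (rest : List (Int × Int × Bool)) (g : Nat) (r : PySem.Dict (Int × Int) String),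
        altLoop tree g rest enc' = some r →
        altLoop tree (F + g) ((k, p, false) :: rest) enc = some r := by
  have hstep := h
  unfold goodStep at h
  cases hget : (PySem.Dict.mk tree).get? k with
  | none => rw [hget] at h; exact absurd h (by simp)
  | some cs =>
    rw [hget] at h
    simp only [List.all_eq_true] at h
    have hg : ∀ c ∈ cs, c ≠ p → (goodIter tree n).contains (c, k) = true := by
      intro c hc hcp
      have h2 := h c hc
      rw [Bool.or_eq_true, beq_iff_eq] at h2
      exact h2.resolve_left hcp
    obtain ⟨e1, hco1, hext1, hhas1, T1⟩ := machine_children tree k p (frameCost tree n)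
      (fun c => (goodIter tree n).contains (c, k) = true) H cs enc hco hg
    obtain ⟨ls, hcol, hf2⟩ := altCollect_some e1 k p cs []
      (fun c hc hcp => (hhas1 c hc hcp).imp (fun _ hs => hs.2))
    rw [List.nil_append] at hcol
    have hfB : List.Forall₂ (fun c s => EvalA tree c k s) (cs.filter (fun c => c ≠ p)) ls :=
      hf2.imp (fun c s hcs => hco1 c k s hcs)
    -- A's value at (k, p) and its label list
    obtain ⟨sA, hA⟩ := goodStep_ahuA tree n k p hstep
    cases hchA : ahuChildren n tree k p cs [] with
    | none => rw [ahuA_eval_none n tree k p cs hget hchA] at hA; exact absurd hA (by simp)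
    | some rA =>
      obtain ⟨lsA, hre, hfA⟩ := ahuChildren_chars n tree k p cs [] rA hchA
      rw [List.nil_append] at hre
      rw [hre] at hchA
      have hfA' : List.Forall₂ (fun c s => EvalA tree c k s) (cs.filter (fun c => c ≠ p)) lsA :=
        hfA.imp (fun _ _ hcs => ⟨n, hcs⟩)
      have hls : ls = lsA := labels_unique tree k _ ls lsA hfB hfA'
      subst hls
      have hAval : ahuA (n+1) tree k p
          = some ("(" ++ PySem.Str.join "" (PySem.List.sorted ls (fun x => x)) ++ ")") := by
        rw [ahuA_eval n tree k p cs ls hget hchA, branch_eq]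
      have hevKP : EvalA tree k p ("(" ++ PySem.Str.join "" (PySem.List.sorted ls (fun x => x)) ++ ")") :=
        ⟨n+1, hAval⟩
      refine ⟨e1.insert (k, p) ("(" ++ PySem.Str.join "" (PySem.List.sorted ls (fun x => x)) ++ ")"),
        ?_, ?_, ⟨_, hevKP, PySem.Dict.get?_insert_self _ _ _⟩, ?_⟩
      · -- coherence of the extended table
        intro a b s' hs'
        by_cases hab : ((a, b) : Int × Int) = (k, p)
        · rw [hab, PySem.Dict.get?_insert_self] at hs'
          have hak : a = k := (Prod.ext_iff.mp hab).1
          have hbp : b = p := (Prod.ext_iff.mp hab).2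
          rw [hak, hbp, ← Option.some.inj hs']
          exact hevKP
        · rw [PySem.Dict.get?_insert_of_ne _ _ hab] at hs'
          exact hco1 a b s' hs'
      · -- the table only grows (an overwritten entry held the same value, by uniqueness)
        intro key v hv
        have hv1 := hext1 key v hv
        by_cases hkey : key = (k, p)
        · subst hkey
          have : v = "(" ++ PySem.Str.join "" (PySem.List.sorted ls (fun x => x)) ++ ")" :=
            evalA_unique tree k p _ _ (hco1 k p v hv1) hevKP
          rw [PySem.Dict.get?_insert_self, this]
        · rw [PySem.Dict.get?_insert_of_ne _ _ hkey]
          exact hv1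
      · -- the fuel-indexed run: push step, child frames, done step
        intro rest g r hr
        have stepD : altLoop tree (g+1) ((k, p, true) :: rest) e1 = some r := by
          rw [altLoop_done_eval tree g k p rest e1 cs ls hget hcol]
          exact hr
        have stepC := T1 ((k, p, true) :: rest) (g+1) r stepD
        have stepP : altLoop tree (cs.length * frameCost tree n + (g+1) + 1)
            ((k, p, false) :: rest) enc = some r := by
          rw [altLoop_push_eval tree _ k p rest enc cs hget]
          exact stepC
        have hle : cs.length * frameCost tree n + (g+1) + 1 ≤ F + g := by
          have := hF cs hget
          omega
        exact altLoop_mono_le tree _ _ hle _ _ _ stepP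

-- MAIN: B's machine fully processes any good frame at cost frameCost, installing A's value
lemma machine_good (tree : List (Int × List Int)) :
    ∀ (n : Nat) (k p : Int) (enc : PySem.Dict (Int × Int) String), Coherent tree enc →
      goodStep tree (goodIter tree n) (k, p) = true →
      ∃ enc', Coherent tree enc' ∧ Extends enc enc' ∧
        (∃ s, EvalA tree k p s ∧ enc'.get? (k, p) = some s) ∧
        ∀ (rest : List (Int × Int × Bool)) (g : Nat) (r : PySem.Dict (Int × Int) String),
          altLoop tree g rest enc' = some r →
          altLoop tree (frameCost tree (n+1) + g) ((k, p, false) :: rest) enc = some r := by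
  intro n
  induction n with
  | zero =>
    intro k p enc hco h
    refine machine_core tree 0 k p (frameCost tree 1) ?_ enc hco h ?_
    · intro cs hget
      rw [frameCost]
      exact Nat.add_le_add_right
        (Nat.mul_le_mul_right _ (kids_le_maxKids tree k cs hget)) 2
    · intro c enc' _ hgood
      simp [goodIter] at hgood
  | succ m ih =>
    intro k p enc hco h
    refine machine_core tree (m+1) k p (frameCost tree (m+2)) ?_ enc hco h ?_
    · intro cs hget
      rw [frameCost]
      exact Nat.add_le_add_right
        (Nat.mul_le_mul_right _ (kids_le_maxKids tree k cs hget)) 2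
    · intro c enc' hco' hgood
      have hmem := List.contains_iff_mem.mp hgood
      rw [goodIter] at hmem
      exact ih c k enc' hco' (List.mem_filter.mp hmem).2

-- ===== VERDICT (by name: the statement is the Claim_ definition above) =====
theorem ahu_dfs_spec : Claim_equal_ahu_dfs := by
  intro tree node parent _hdom hpre
  unfold Pre_ahu_dfs at hpre
  obtain ⟨sA, hA⟩ := goodStep_ahuA tree (tree.length + selfLoops tree + 2) node parent hpre
  have hcoE : Coherent tree (PySem.Dict.empty) := by
    intro a b s h
    exact absurd h (by simp [PySem.Dict.get?, PySem.Dict.empty])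
  obtain ⟨enc', _, _, ⟨s, hev, hgets⟩, T⟩ := machine_good tree (tree.length + selfLoops tree + 2)
    node parent PySem.Dict.empty hcoE hpre
  have h1 : altLoop tree 1 [] enc' = some enc' := altLoop_nil tree 0 enc'
  have h2 := T [] 1 enc' h1
  have h3 : altLoop tree (frameCost tree (tree.length + selfLoops tree + 3) + 2)
      [(node, parent, false)] PySem.Dict.empty = some enc' :=
    altLoop_mono_le tree _ _ (by
      have : tree.length + selfLoops tree + 2 + 1 = tree.length + selfLoops tree + 3 := by omega
      rw [← this]
      omega) _ _ _ h2
  have hs : sA = s := evalA_unique tree node parent sA s ⟨_, hA⟩ hev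
  show ahu_dfs tree node parent = ahu_dfs_alt tree node parent
  have hA' : ahuA (tree.length + selfLoops tree + 3) tree node parent = some sA := hA
  rw [ahu_dfs, ahu_dfs_alt, hA', h3]
  show sA = (enc'.get? (node, parent)).getD ""
  rw [hgets]
  exact hs
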